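-- pv_equiv track=rewrite | github.com/liujialetao/julei | utils.py | smoothing_sentence_frequency
-- ===== SOURCE A (Python) =====
-- def smoothing_sentence_frequency(frequence_sentence, min_count=1):
--     '''
--     :param frequence_sentence:
--     :param min_count:语料至少出现的次数，小于min_count将被丢弃
--     :return:
--     '''
--     import math
--     def re_cal(n):
--         if n==1:
--             return 1
--         elif n<100:
--             return 2
--         elif n<1000:
--             return 3
--         else:
--             return 4
--         # if n<=2:
--         #     return n
--         # else:
--         #     #自定义的平滑方法
--         #     n = int(math.log(n))+2
--         #     return
--
--     # 根据语料频次，过滤语料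
--     frequence_sentence = [(content, count) for content, count in list(frequence_sentence.items()) if count >= min_count]
--     frequence_sentence = sorted(dict(frequence_sentence).items(), key=lambda x: x[1], reverse=True)
--
--     # 平滑语料频次
--     frequence_sentence2 = [(content, re_cal(count)) for content, count in frequence_sentence]
--     frequence_sentence4 = sorted(dict(frequence_sentence2).items(), key=lambda x: x[1], reverse=True)
--
--     # 讲语料按频次复制，存进列表返回
--     corpus_list = []
--     for content, count in frequence_sentence4:
--         corpus_list += [content] * count
--
--     return corpus_list
-- ===== SOURCE B (Python) =====
-- def smoothing_sentence_frequency(frequence_sentence, min_count=1):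
--     def smooth(n):
--         if n == 1:
--             return 1
--         elif n < 100:
--             return 2
--         elif n < 1000:
--             return 3
--         else:
--             return 4
--
--     # one comparison sort by original count (desc, stable), then a counting/bucket
--     # pass replaces the second comparison sort: re-grouping by smoothed value
--     # with concatenation 4,3,2,1 IS the stable descending sort by smoothed value.
--     kept = sorted([(c, n) for c, n in frequence_sentence.items() if n >= min_count],
--                   key=lambda x: x[1], reverse=True)
--     ones, twos, threes, fours = [], [], [], []
--     for content, count in kept:
--         s = smooth(count)
--         if s == 4:
--             fours.append(content)
--         elif s == 3:
--             threes.append(content)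
--         elif s == 2:
--             twos.append(content)
--         else:
--             ones.append(content)
--     corpus_list = []
--     for content in fours:
--         corpus_list += [content] * 4
--     for content in threes:
--         corpus_list += [content] * 3
--     for content in twos:
--         corpus_list += [content] * 2
--     corpus_list += ones
--     return corpus_list
-- ===== Notes on version B (the rewrite author's own statement) =====
-- stated objective: alternative
-- what changed: The two dict-rebuild-then-comparison-sort passes are replaced by one sort by original count followed by a single counting/bucket pass: contents are appended to one of four buckets by their smoothed value and the corpus is emitted by concatenating buckets 4,3,2,1, which realises the stable descending sort by smoothed value without sorting again.
import Mathlib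
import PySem

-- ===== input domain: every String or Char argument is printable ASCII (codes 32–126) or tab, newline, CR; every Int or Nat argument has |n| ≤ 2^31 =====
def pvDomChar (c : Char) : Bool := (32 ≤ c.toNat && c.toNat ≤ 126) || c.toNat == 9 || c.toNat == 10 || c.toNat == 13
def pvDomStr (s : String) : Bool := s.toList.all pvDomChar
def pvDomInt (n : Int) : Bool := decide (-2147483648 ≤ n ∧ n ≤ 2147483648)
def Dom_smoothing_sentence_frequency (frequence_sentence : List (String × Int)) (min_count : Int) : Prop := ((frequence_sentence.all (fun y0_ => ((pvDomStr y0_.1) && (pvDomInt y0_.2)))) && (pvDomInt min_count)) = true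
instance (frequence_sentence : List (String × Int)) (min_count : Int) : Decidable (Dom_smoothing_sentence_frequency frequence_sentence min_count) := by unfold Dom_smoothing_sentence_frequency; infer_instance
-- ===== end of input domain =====

-- B replaces A's second dict-rebuild + comparison sort by a single counting/bucket pass
-- over the count-sorted items (buckets 4,3,2,1 concatenated = stable sort by smoothed value).

-- ===== PORT A =====
-- helper re_cal of A (B's Python carries the identical local helper `smooth`)
def re_cal (n : Int) : Int :=
  if n == 1 then 1
  else if n < 100 then 2
  else if n < 1000 then 3
  else 4

def smoothing_sentence_frequency (frequence_sentence : List (String × Int)) (min_count : Int) : List String :=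
  -- frequence_sentence = [(content, count) for ... if count >= min_count]
  let fs1 := frequence_sentence.filter (fun p => min_count ≤ p.2)
  -- frequence_sentence = sorted(dict(fs1).items(), key=lambda x: x[1], reverse=True)
  let fs2 := PySem.List.sorted (PySem.Dict.ofList fs1).items (fun p => p.2) true
  -- frequence_sentence2 = [(content, re_cal(count)) for content, count in fs2]
  let fs3 := fs2.map (fun p => (p.1, re_cal p.2))
  -- frequence_sentence4 = sorted(dict(fs3).items(), key=lambda x: x[1], reverse=True)
  let fs4 := PySem.List.sorted (PySem.Dict.ofList fs3).items (fun p => p.2) true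
  -- corpus_list loop: corpus_list += [content] * count
  fs4.foldl (fun acc p => acc ++ List.replicate p.2.toNat p.1) []

-- ===== PORT B =====
def smoothing_sentence_frequency_alt (frequence_sentence : List (String × Int)) (min_count : Int) : List String :=
  let kept := PySem.List.sorted (frequence_sentence.filter (fun p => min_count ≤ p.2)) (fun p => p.2) true
  -- bucket pass: (ones, twos, threes, fours)
  let b := kept.foldl
    (fun (b : List String × List String × List String × List String) p =>
      let s := re_cal p.2
      if s == 4 then (b.1, b.2.1, b.2.2.1, b.2.2.2 ++ [p.1])
      else if s == 3 then (b.1, b.2.1, b.2.2.1 ++ [p.1], b.2.2.2)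
      else if s == 2 then (b.1, b.2.1 ++ [p.1], b.2.2.1, b.2.2.2)
      else (b.1 ++ [p.1], b.2.1, b.2.2.1, b.2.2.2))
    ([], [], [], [])
  let c4 := b.2.2.2.foldl (fun acc c => acc ++ List.replicate 4 c) []
  let c3 := b.2.2.1.foldl (fun acc c => acc ++ List.replicate 3 c) c4
  let c2 := b.2.1.foldl (fun acc c => acc ++ List.replicate 2 c) c3
  c2 ++ b.1

-- ===== PRECONDITION & SPEC =====
-- Pre_ excludes association lists with duplicate keys: they do not represent any Python
-- dict (A's parameter is a dict, so every actual input has distinct keys), and on them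
-- A's dict() reconstruction would collapse duplicates while B keeps all pairs.
def Pre_smoothing_sentence_frequency (frequence_sentence : List (String × Int)) (min_count : Int) : Prop :=
  (frequence_sentence.map Prod.fst).Nodup

instance (frequence_sentence : List (String × Int)) (min_count : Int) : Decidable (Pre_smoothing_sentence_frequency frequence_sentence min_count) := by unfold Pre_smoothing_sentence_frequency; infer_instance

def pvWitness_smoothing_sentence_frequency : (List (String × Int)) × Int := ([("ab", 2), ("c", 1), ("d", 1000)], 1)

def Spec_smoothing_sentence_frequency (frequence_sentence : List (String × Int)) (min_count : Int) (out : List String) : Prop := out = smoothing_sentence_frequency_alt frequence_sentence min_count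
instance (frequence_sentence : List (String × Int)) (min_count : Int) (out : List String) : Decidable (Spec_smoothing_sentence_frequency frequence_sentence min_count out) := by unfold Spec_smoothing_sentence_frequency; infer_instance

-- ===== CLAIM (what is proved, stated in full; the proofs are below) =====
def Claim_equal_smoothing_sentence_frequency : Prop := ∀ (frequence_sentence : List (String × Int)) (min_count : Int), Dom_smoothing_sentence_frequency frequence_sentence min_count → Pre_smoothing_sentence_frequency frequence_sentence min_count → Spec_smoothing_sentence_frequency frequence_sentence min_count (smoothing_sentence_frequency frequence_sentence min_count)

-- ===== LEMMAS AND PROOFS =====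

-- a dict built from an association list with distinct keys has exactly that items list
theorem items_ofList_nodup (l : List (String × Int)) (h : (l.map Prod.fst).Nodup) :
    (PySem.Dict.ofList l).items = l := by
  have := PySem.Dict.items_foldl_insert_fresh (ν := Int) l Prod.fst Prod.snd PySem.Dict.empty
    (by intro a _; rfl) h
  simpa [PySem.Dict.ofList, PySem.Dict.update, PySem.Dict.items] using this

theorem re_cal_mem (n : Int) : re_cal n = 1 ∨ re_cal n = 2 ∨ re_cal n = 3 ∨ re_cal n = 4 := by
  unfold re_cal; split_ifs <;> simp

theorem insertBy_cons {α : Type} (before : α → α → Bool) (x y : α) (ys : List α) :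
    PySem.List.insertBy before x (y :: ys) =
      if before x y then x :: y :: ys else y :: PySem.List.insertBy before x ys := rfl

theorem insertBy_append_not {α : Type} (before : α → α → Bool) (x : α) (A B : List α)
    (h : ∀ a ∈ A, before x a = false) :
    PySem.List.insertBy before x (A ++ B) = A ++ PySem.List.insertBy before x B := by
  induction A with
  | nil => rfl
  | cons a t ih =>
      rw [List.cons_append, insertBy_cons, h a (by simp)]
      simp only [Bool.false_eq_true, if_false]
      rw [ih (fun y hy => h y (List.mem_cons_of_mem _ hy)), List.cons_append]

theorem insertBy_all_before {α : Type} (before : α → α → Bool) (x : α) (ys : List α)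
    (h : ∀ y ∈ ys, before x y = true) :
    PySem.List.insertBy before x ys = x :: ys := by
  cases ys with
  | nil => rfl
  | cons y t => simp [PySem.List.insertBy, h y (by simp)]

-- stable descending sort of a {1,2,3,4}-valued list is bucket concatenation 4,3,2,1
theorem sorted_rev_buckets (l : List (String × Int))
    (h : ∀ p ∈ l, p.2 = 1 ∨ p.2 = 2 ∨ p.2 = 3 ∨ p.2 = 4) :
    PySem.List.sorted l (fun p => p.2) true =
      l.filter (fun p => p.2 == 4) ++ l.filter (fun p => p.2 == 3) ++
      l.filter (fun p => p.2 == 2) ++ l.filter (fun p => p.2 == 1) := by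
  rw [PySem.List.sorted_rev_eq_foldl_insertBy]
  induction l using List.reverseRecOn with
  | nil => rfl
  | append_singleton t x ih =>
      have ht : ∀ p ∈ t, p.2 = 1 ∨ p.2 = 2 ∨ p.2 = 3 ∨ p.2 = 4 := by
        intro p hp; exact h p (by simp [hp])
      rw [List.foldl_append, List.foldl_cons, List.foldl_nil, ih ht]
      have key_of_mem : ∀ (i : Int) (p : String × Int), p ∈ t.filter (fun q => q.2 == i) → p.2 = i := by
        intro i p hp
        have := (List.mem_filter.mp hp).2
        simpa using this
      rcases h x (by simp) with hx | hx | hx | hx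
      · -- x.2 = 1 : goes to the very end
        rw [PySem.List.insertBy_of_forall_not_before _ _ _ (by
          intro y hy
          simp only [List.mem_append] at hy
          rcases hy with ((h4 | h3) | h2) | h1
          · simp [key_of_mem 4 y h4, hx]
          · simp [key_of_mem 3 y h3, hx]
          · simp [key_of_mem 2 y h2, hx]
          · simp [key_of_mem 1 y h1, hx])]
        simp [List.filter_append, hx]
      · -- x.2 = 2
        have hnb : ∀ a ∈ t.filter (fun q => q.2 == 4) ++ t.filter (fun q => q.2 == 3) ++ t.filter (fun q => q.2 == 2), decide (a.2 < x.2) = false := by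
          intro a ha
          simp only [List.mem_append] at ha
          rcases ha with (h4 | h3) | h2
          · simp [key_of_mem 4 a h4, hx]
          · simp [key_of_mem 3 a h3, hx]
          · simp [key_of_mem 2 a h2, hx]
        rw [insertBy_append_not _ _ _ _ hnb,
          insertBy_all_before _ _ _ (by
            intro y hy; simp [key_of_mem 1 y hy, hx])]
        simp [List.filter_append, hx]
      · -- x.2 = 3
        have hnb : ∀ a ∈ t.filter (fun q => q.2 == 4) ++ t.filter (fun q => q.2 == 3), decide (a.2 < x.2) = false := by
          intro a ha
          simp only [List.mem_append] at ha
          rcases ha with h4 | h3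
          · simp [key_of_mem 4 a h4, hx]
          · simp [key_of_mem 3 a h3, hx]
        rw [show t.filter (fun q => q.2 == 4) ++ t.filter (fun q => q.2 == 3) ++ t.filter (fun q => q.2 == 2) ++ t.filter (fun q => q.2 == 1) = (t.filter (fun q => q.2 == 4) ++ t.filter (fun q => q.2 == 3)) ++ (t.filter (fun q => q.2 == 2) ++ t.filter (fun q => q.2 == 1)) by simp [List.append_assoc],
          insertBy_append_not _ _ _ _ hnb,
          insertBy_all_before _ _ _ (by
            intro y hy
            simp only [List.mem_append] at hy
            rcases hy with h2 | h1
            · simp [key_of_mem 2 y h2, hx]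
            · simp [key_of_mem 1 y h1, hx])]
        simp [List.filter_append, hx]
      · -- x.2 = 4
        have hnb : ∀ a ∈ t.filter (fun q => q.2 == 4), decide (a.2 < x.2) = false := by
          intro a ha; simp [key_of_mem 4 a ha, hx]
        rw [show t.filter (fun q => q.2 == 4) ++ t.filter (fun q => q.2 == 3) ++ t.filter (fun q => q.2 == 2) ++ t.filter (fun q => q.2 == 1) = t.filter (fun q => q.2 == 4) ++ (t.filter (fun q => q.2 == 3) ++ t.filter (fun q => q.2 == 2) ++ t.filter (fun q => q.2 == 1)) by simp [List.append_assoc],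
          insertBy_append_not _ _ _ _ hnb,
          insertBy_all_before _ _ _ (by
            intro y hy
            simp only [List.mem_append] at hy
            rcases hy with (h3 | h2) | h1
            · simp [key_of_mem 3 y h3, hx]
            · simp [key_of_mem 2 y h2, hx]
            · simp [key_of_mem 1 y h1, hx])]
        simp [List.filter_append, hx]

-- push a map through the {1,2,3,4} filters
theorem filter_eq_map_filter (i : Int) (l : List (String × Int)) :
    (l.map (fun p => (p.1, re_cal p.2))).filter (fun q => q.2 == i) =
      (l.filter (fun p => re_cal p.2 == i)).map (fun p => (p.1, re_cal p.2)) := by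
  rw [List.filter_map]; rfl

-- the bucket fold of B, characterised
theorem bucket_foldl (l : List (String × Int)) (b : List String × List String × List String × List String) :
    l.foldl
      (fun (b : List String × List String × List String × List String) p =>
        let s := re_cal p.2
        if s == 4 then (b.1, b.2.1, b.2.2.1, b.2.2.2 ++ [p.1])
        else if s == 3 then (b.1, b.2.1, b.2.2.1 ++ [p.1], b.2.2.2)
        else if s == 2 then (b.1, b.2.1 ++ [p.1], b.2.2.1, b.2.2.2)
        else (b.1 ++ [p.1], b.2.1, b.2.2.1, b.2.2.2)) b =
    (b.1 ++ (l.filter (fun p => re_cal p.2 == 1)).map Prod.fst,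
     b.2.1 ++ (l.filter (fun p => re_cal p.2 == 2)).map Prod.fst,
     b.2.2.1 ++ (l.filter (fun p => re_cal p.2 == 3)).map Prod.fst,
     b.2.2.2 ++ (l.filter (fun p => re_cal p.2 == 4)).map Prod.fst) := by
  induction l generalizing b with
  | nil => simp
  | cons p t ih =>
      simp only [List.foldl_cons]
      rw [ih]
      rcases re_cal_mem p.2 with hp | hp | hp | hp <;>
        simp [hp]

-- A's replication fold over a constant-snd block equals B's per-bucket fold
theorem replicate_fold_const (i : Int) (l : List (String × Int)) (acc : List String)
    (h : ∀ p ∈ l, p.2 = i) :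
    l.foldl (fun acc p => acc ++ List.replicate p.2.toNat p.1) acc =
      (l.map Prod.fst).foldl (fun acc c => acc ++ List.replicate i.toNat c) acc := by
  induction l generalizing acc with
  | nil => rfl
  | cons p t ih =>
      simp only [List.foldl_cons, List.map_cons]
      rw [h p (by simp), ih _ (fun q hq => h q (by simp [hq]))]

-- ===== VERDICT (by name: the statement is the Claim_ definition above) =====
theorem fst_comp_recal : (Prod.fst ∘ (fun p : String × Int => (p.1, re_cal p.2))) = Prod.fst := rfl

theorem smoothing_sentence_frequency_spec : Claim_equal_smoothing_sentence_frequency := by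
  intro fs mc _ hpre
  unfold Spec_smoothing_sentence_frequency
  have h1 : ((fs.filter (fun p => mc ≤ p.2)).map Prod.fst).Nodup :=
    hpre.sublist (List.Sublist.map Prod.fst (List.filter_sublist (l := fs)))
  have hperm : (PySem.List.sorted (fs.filter (fun p => mc ≤ p.2)) (fun p => p.2) true).Perm
      (fs.filter (fun p => mc ≤ p.2)) := PySem.List.sorted_perm _ _ _
  have h2 : ((PySem.List.sorted (fs.filter (fun p => mc ≤ p.2)) (fun p => p.2) true).map Prod.fst).Nodup :=
    ((hperm.map Prod.fst).nodup_iff).mpr h1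
  set kept := PySem.List.sorted (fs.filter (fun p => mc ≤ p.2)) (fun p => p.2) true with hkept
  have h3 : ((kept.map (fun p => (p.1, re_cal p.2))).map Prod.fst).Nodup := by
    rw [List.map_map, fst_comp_recal]; exact h2
  have hvals : ∀ p ∈ kept.map (fun p => (p.1, re_cal p.2)), p.2 = 1 ∨ p.2 = 2 ∨ p.2 = 3 ∨ p.2 = 4 := by
    intro p hp
    obtain ⟨q, _, rfl⟩ := List.mem_map.mp hp
    exact re_cal_mem q.2
  have hfiltermem : ∀ (i : Int) (p : String × Int),
      p ∈ (kept.filter (fun q => re_cal q.2 == i)).map (fun p => (p.1, re_cal p.2)) → p.2 = i := by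
    intro i p hp
    obtain ⟨q, hq, rfl⟩ := List.mem_map.mp hp
    have := (List.mem_filter.mp hq).2
    simpa using this
  simp only [smoothing_sentence_frequency, smoothing_sentence_frequency_alt, ← hkept]
  rw [items_ofList_nodup _ h1, ← hkept, items_ofList_nodup _ h3,
    sorted_rev_buckets _ hvals,
    filter_eq_map_filter 4 kept, filter_eq_map_filter 3 kept,
    filter_eq_map_filter 2 kept, filter_eq_map_filter 1 kept,
    List.foldl_append, List.foldl_append, List.foldl_append,
    replicate_fold_const 4 _ _ (hfiltermem 4),
    replicate_fold_const 3 _ _ (hfiltermem 3),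
    replicate_fold_const 2 _ _ (hfiltermem 2),
    replicate_fold_const 1 _ _ (hfiltermem 1),
    bucket_foldl]
  simp only [List.map_map, fst_comp_recal, List.nil_append,
    Int.toNat_one, List.replicate_one, PySem.List.foldl_append_singleton,
    show ((4 : Int)).toNat = 4 from rfl, show ((3 : Int)).toNat = 3 from rfl,
    show ((2 : Int)).toNat = 2 from rfl]
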